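-- pv_equiv track=rewrite | github.com/devsungmin/Algorithm | Programmers/Level2/쿼드압축_후_개수_세기.py | check
-- ===== SOURCE A (Python) =====
-- def check(s):
--     if len(s) == 1:
--         return s[0][0]
--
--     tmp = [[] for _ in range(len(s)//2)]
--
--     for i in range(1, len(s), 2):
--         for j in range(1, len(s), 2):
--             cnt0 = s[i][j][0] + s[i][j-1][0] + s[i-1][j][0] + s[i-1][j-1][0]
--             cnt1 = s[i][j][1] + s[i][j-1][1] + s[i-1][j][1] + s[i-1][j-1][1]
--
--             if cnt1 == 0: cnt0 = 1
--             if cnt0 == 0: cnt1 = 1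
--
--             tmp[i//2].append([cnt0, cnt1])
--
--     return check(tmp)
-- ===== SOURCE B (Python) =====
-- def _merge(tl, tr, bl, br):
--     cnt0 = tl[0] + tr[0] + bl[0] + br[0]
--     cnt1 = tl[1] + tr[1] + bl[1] + br[1]
--     if cnt1 == 0: cnt0 = 1
--     if cnt0 == 0: cnt1 = 1
--     return [cnt0, cnt1]
--
-- def check(s):
--     if len(s) == 1:
--         return s[0][0]
--     m = len(s) // 2
--     tl = check([row[:m] for row in s[:m]])
--     tr = check([row[m:] for row in s[:m]])
--     bl = check([row[:m] for row in s[m:]])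
--     br = check([row[m:] for row in s[m:]])
--     return _merge(tl, tr, bl, br)
-- ===== Notes on version B (the rewrite author's own statement) =====
-- stated objective: alternative
-- what changed: Replaced A's bottom-up level-by-level pairing (build the whole half-size grid, recurse on it) with a top-down recursive quad-tree: split the grid into four n//2-quadrants, reduce each recursively, merge the four count pairs.
-- outside the precondition, e.g. on check([[[0, 0], [1, 1]], [[1, 0], [0, 1]], []]): A returns [2, 2], B raises IndexError
import Mathlib
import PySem

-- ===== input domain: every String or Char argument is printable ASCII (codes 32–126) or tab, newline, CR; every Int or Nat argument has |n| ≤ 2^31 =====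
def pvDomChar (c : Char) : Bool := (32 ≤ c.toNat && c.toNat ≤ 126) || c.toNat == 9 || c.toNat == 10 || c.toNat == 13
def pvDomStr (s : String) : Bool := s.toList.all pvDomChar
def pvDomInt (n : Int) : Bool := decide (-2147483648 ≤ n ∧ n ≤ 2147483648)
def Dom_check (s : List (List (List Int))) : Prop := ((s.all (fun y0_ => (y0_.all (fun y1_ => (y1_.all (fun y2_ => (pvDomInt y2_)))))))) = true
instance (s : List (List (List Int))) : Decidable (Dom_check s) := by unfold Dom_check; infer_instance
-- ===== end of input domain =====

-- B replaces A's bottom-up level-by-level reduction with a top-down recursive quad-tree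
-- split (same results on the stated power-of-two square domain; objective: alternative).


-- shared by both ports: the collapse 'if cnt1 == 0: cnt0 = 1; if cnt0 == 0: cnt1 = 1; [cnt0, cnt1]'
def mk2 (c0 c1 : Int) : List Int :=
  let c0' := if c1 = 0 then 1 else c0
  let c1' := if c0' = 0 then 1 else c1
  [c0', c1']

-- ===== PORT A =====
-- s[a][b][k] through PySem.pyGet? (getD defaults are never reached inside Pre_check)
def pyCell (s : List (List (List Int))) (a b k : Int) : Int :=
  (PySem.List.pyGet? ((PySem.List.pyGet? ((PySem.List.pyGet? s a).getD []) b).getD []) k).getD 0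

-- the body of A's double loop at (i, j)
def cellA (s : List (List (List Int))) (i j : Int) : List Int :=
  mk2 (pyCell s i j 0 + pyCell s i (j-1) 0 + pyCell s (i-1) j 0 + pyCell s (i-1) (j-1) 0)
      (pyCell s i j 1 + pyCell s i (j-1) 1 + pyCell s (i-1) j 1 + pyCell s (i-1) (j-1) 1)

-- termination of A's recursion (cited in decreasing_by): tmp has len(s)//2 < len(s) rows
lemma checkA_tmp_len (s : List (List (List Int))) (h : 1 < s.length) :
    ((PySem.List.pyRange 1 (s.length : Int) 2).foldl
      (fun acc i => acc ++
        [(PySem.List.pyRange 1 (s.length : Int) 2).foldl (fun row j => row ++ [cellA s i j]) []])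
      []).length < s.length := by
  rw [PySem.List.foldl_append_singleton_eq_map
        (f := fun i => (PySem.List.pyRange 1 (s.length : Int) 2).foldl
          (fun row j => row ++ [cellA s i j]) [])]
  rw [PySem.List.pyRange_of_pos 1 (s.length : Int) (by norm_num)]
  simp only [List.nil_append, List.length_map, List.length_range]
  have h1 : (1 : Int) < (s.length : Int) := by exact_mod_cast h
  rw [if_pos h1]
  omega

-- A: pair up rows/columns (indices (i-1,i)×(j-1,j) for odd i,j), append the merged cells
-- row by row (tmp[i//2] is filled in increasing i), recurse on the halved grid.
-- Python A recurses forever on the empty grid; the 's.length = 0' guard only makes the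
-- port total there (outside Pre_check).
def check (s : List (List (List Int))) : List Int :=
  if s.length = 1 then (PySem.List.pyGet? ((PySem.List.pyGet? s 0).getD []) 0).getD []
  else if s.length = 0 then []
  else
    check ((PySem.List.pyRange 1 (s.length : Int) 2).foldl
      (fun acc i => acc ++
        [(PySem.List.pyRange 1 (s.length : Int) 2).foldl (fun row j => row ++ [cellA s i j]) []])
      [])
termination_by s.length
decreasing_by exact checkA_tmp_len s (by omega)

-- ===== PORT B =====
-- _merge(tl, tr, bl, br) of Source B (tl[0] etc. through pyGet?, default never reached inside Pre_check)
def combB (tl tr bl br : List Int) : List Int :=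
  mk2 ((PySem.List.pyGet? tl 0).getD 0 + (PySem.List.pyGet? tr 0).getD 0 +
       (PySem.List.pyGet? bl 0).getD 0 + (PySem.List.pyGet? br 0).getD 0)
      ((PySem.List.pyGet? tl 1).getD 0 + (PySem.List.pyGet? tr 1).getD 0 +
       (PySem.List.pyGet? bl 1).getD 0 + (PySem.List.pyGet? br 1).getD 0)

-- termination of B's recursion (cited in decreasing_by): each quadrant has len(s)//2 < len(s) rows
lemma checkB_top_len (s : List (List (List Int))) (h : 1 < s.length) :
    (PySem.List.slice s none (some (PySem.Int.floordiv (s.length : Int) 2))).length < s.length := by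
  rw [PySem.Int.floordiv_eq_ediv_of_pos (by norm_num)]
  rw [PySem.List.slice_to s (by positivity)]
  simp only [List.length_take]
  omega

lemma checkB_bot_len (s : List (List (List Int))) (h : 1 < s.length) :
    (PySem.List.slice s (some (PySem.Int.floordiv (s.length : Int) 2)) none).length < s.length := by
  rw [PySem.Int.floordiv_eq_ediv_of_pos (by norm_num)]
  rw [PySem.List.slice_from s (by positivity)]
  simp only [List.length_drop]
  omega

-- B: top-down quad-tree — split into four len(s)//2-quadrants, reduce each recursively,
-- merge the four pairs.  Python B recurses forever on the empty grid; the 's.length = 0'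
-- guard only makes the port total there (outside Pre_check).
def check_alt (s : List (List (List Int))) : List Int :=
  if s.length = 1 then (PySem.List.pyGet? ((PySem.List.pyGet? s 0).getD []) 0).getD []
  else if s.length = 0 then []
  else
    let m : Int := PySem.Int.floordiv (s.length : Int) 2
    let tl := check_alt ((PySem.List.slice s none (some m)).map fun row => PySem.List.slice row none (some m))
    let tr := check_alt ((PySem.List.slice s none (some m)).map fun row => PySem.List.slice row (some m) none)
    let bl := check_alt ((PySem.List.slice s (some m) none).map fun row => PySem.List.slice row none (some m))
    let br := check_alt ((PySem.List.slice s (some m) none).map fun row => PySem.List.slice row (some m) none)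
    combB tl tr bl br
termination_by s.length
decreasing_by
  all_goals simp only [List.length_map]
  · exact checkB_top_len s (by omega)
  · exact checkB_top_len s (by omega)
  · exact checkB_bot_len s (by omega)
  · exact checkB_bot_len s (by omega)

-- ===== PRECONDITION & SPEC =====
-- Pre_check restricts to power-of-two square grids of count pairs — the quad-compression
-- domain.  It excludes (a) non-power-of-two sizes, where A returns a value produced by its
-- accidental truncation of the trailing row/column while B's per-quadrant split raises
-- IndexError, and (b) ragged/short rows or cells with fewer than two entries, on which the
-- Pythons raise IndexError (the empty grid makes both recurse forever).
def Pre_check (s : List (List (List Int))) : Prop :=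
  0 < s.length ∧ s.length = 2 ^ Nat.log2 s.length ∧
  (∀ row ∈ s, s.length ≤ row.length) ∧
  (1 < s.length → ∀ row ∈ s, ∀ c ∈ row, 2 ≤ c.length)
instance (s : List (List (List Int))) : Decidable (Pre_check s) := by
  unfold Pre_check; infer_instance

def pvWitness_check : List (List (List Int)) := [[[1, 0], [0, 1]], [[1, 0], [1, 0]]]

def Spec_check (s : List (List (List Int))) (out : List Int) : Prop := out = check_alt s
instance (s : List (List (List Int))) (out : List Int) : Decidable (Spec_check s out) := by
  unfold Spec_check; infer_instance

-- ===== CLAIM (what is proved, stated in full; the proofs are below) =====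
def Claim_equal_check : Prop :=
  ∀ (s : List (List (List Int))), Dom_check s → Pre_check s → Spec_check s (check s)

-- ===== LEMMAS AND PROOFS =====

-- s[i][j][k] with Nat indices and getD defaults
def pN (s : List (List (List Int))) (i j k : Nat) : Int :=
  (((s[i]?.getD [])[j]?.getD [])[k]?).getD 0

-- the merged cell of the row pair (2a, 2a+1) and column pair (2b, 2b+1)
def cellN (s : List (List (List Int))) (a b : Nat) : List Int :=
  mk2 (pN s (2*a+1) (2*b+1) 0 + pN s (2*a+1) (2*b) 0 + pN s (2*a) (2*b+1) 0 + pN s (2*a) (2*b) 0)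
      (pN s (2*a+1) (2*b+1) 1 + pN s (2*a+1) (2*b) 1 + pN s (2*a) (2*b+1) 1 + pN s (2*a) (2*b) 1)

-- one level of A's reduction, as a clean map over Nat ranges
def red (s : List (List (List Int))) : List (List (List Int)) :=
  (List.range (s.length / 2)).map fun a => (List.range (s.length / 2)).map fun b => cellN s a b

-- the four quadrants, as the take/drop forms B's slices reduce to
def qtl (m : Nat) (s : List (List (List Int))) := (s.take m).map fun r => r.take m
def qtr (m : Nat) (s : List (List (List Int))) := (s.take m).map fun r => r.drop m
def qbl (m : Nat) (s : List (List (List Int))) := (s.drop m).map fun r => r.take m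
def qbr (m : Nat) (s : List (List (List Int))) := (s.drop m).map fun r => r.drop m

lemma pyCell_cast (s : List (List (List Int))) (i j k : Nat) :
    pyCell s (i : Int) (j : Int) (k : Int) = pN s i j k := by
  simp [pyCell, pN, PySem.List.pyGet?_natCast]

lemma cellA_cast (s : List (List (List Int))) (a b : Nat) :
    cellA s (1 + 2*(a : Int)) (1 + 2*(b : Int)) = cellN s a b := by
  have e1 : (1 + 2*(a : Int)) = ((2*a+1 : Nat) : Int) := by push_cast; ring
  have e2 : (1 + 2*(a : Int)) - 1 = ((2*a : Nat) : Int) := by push_cast; ring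
  have e3 : (1 + 2*(b : Int)) = ((2*b+1 : Nat) : Int) := by push_cast; ring
  have e4 : (1 + 2*(b : Int)) - 1 = ((2*b : Nat) : Int) := by push_cast; ring
  have e5 : (0 : Int) = ((0 : Nat) : Int) := by norm_num
  have e6 : (1 : Int) = ((1 : Nat) : Int) := by norm_num
  unfold cellA cellN
  rw [e2, e4, e1, e3]
  rw [e5, e6]  -- may fail; adjust
  simp only [pyCell_cast]

lemma tmp_eq_red (s : List (List (List Int))) (h : 1 < s.length) :
    ((PySem.List.pyRange 1 (s.length : Int) 2).foldl
      (fun acc i => acc ++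
        [(PySem.List.pyRange 1 (s.length : Int) 2).foldl (fun row j => row ++ [cellA s i j]) []])
      []) = red s := by
  have h1 : (1 : Int) < (s.length : Int) := by exact_mod_cast h
  have hr : PySem.List.pyRange 1 (s.length : Int) 2
      = (List.range (s.length / 2)).map (fun k : Nat => 1 + 2*(k : Int)) := by
    rw [PySem.List.pyRange_of_pos 1 (s.length : Int) (by norm_num), if_pos h1]
    have : (((s.length : Int) - 1 + 2 - 1)/2).toNat = s.length / 2 := by omega
    rw [this]
  rw [PySem.List.foldl_append_singleton_eq_map
        (f := fun i => (PySem.List.pyRange 1 (s.length : Int) 2).foldl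
          (fun row j => row ++ [cellA s i j]) [])]
  simp only [List.nil_append, hr, List.map_map]
  unfold red
  apply List.map_congr_left
  intro a _
  simp only [Function.comp]
  rw [PySem.List.foldl_append_singleton_eq_map (f := fun j => cellA s (1 + 2*(a:Int)) j)]
  simp only [List.nil_append, List.map_map]
  apply List.map_congr_left
  intro b _
  exact cellA_cast s a b

lemma checkA_step (s : List (List (List Int))) (h : 1 < s.length) :
    check s = check (red s) := by
  rw [check]
  rw [if_neg (by omega), if_neg (by omega), tmp_eq_red s h]

lemma toNat_half (L : Nat) : ((L : Int) / 2).toNat = L / 2 := by omega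

lemma checkB_step (s : List (List (List Int))) (h : 1 < s.length) :
    check_alt s = combB (check_alt (qtl (s.length/2) s)) (check_alt (qtr (s.length/2) s))
                        (check_alt (qbl (s.length/2) s)) (check_alt (qbr (s.length/2) s)) := by
  rw [check_alt]
  rw [if_neg (by omega), if_neg (by omega)]
  have hm : PySem.Int.floordiv (s.length : Int) 2 = (s.length : Int) / 2 :=
    PySem.Int.floordiv_eq_ediv_of_pos (by norm_num)
  have h0 : (0 : Int) ≤ (s.length : Int) / 2 := by positivity
  simp only [hm, PySem.List.slice_to _ h0, PySem.List.slice_from _ h0, toNat_half]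
  rfl


lemma pN_qtl (s : List (List (List Int))) (m i j k : Nat) (hi : i < m) (hj : j < m) :
    pN (qtl m s) i j k = pN s i j k := by
  unfold pN qtl
  rw [List.getElem?_map, List.getElem?_take, if_pos hi]
  cases s[i]? with
  | none => rfl
  | some r => simp [List.getElem?_take, if_pos hj]

lemma pN_qtr (s : List (List (List Int))) (m i j k : Nat) (hi : i < m) :
    pN (qtr m s) i j k = pN s i (m + j) k := by
  unfold pN qtr
  rw [List.getElem?_map, List.getElem?_take, if_pos hi]
  cases s[i]? with
  | none => rfl
  | some r => simp [List.getElem?_drop]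

lemma pN_qbl (s : List (List (List Int))) (m i j k : Nat) (hj : j < m) :
    pN (qbl m s) i j k = pN s (m + i) j k := by
  unfold pN qbl
  rw [List.getElem?_map, List.getElem?_drop]
  cases s[m + i]? with
  | none => rfl
  | some r => simp [List.getElem?_take, if_pos hj]

lemma pN_qbr (s : List (List (List Int))) (m i j k : Nat) :
    pN (qbr m s) i j k = pN s (m + i) (m + j) k := by
  unfold pN qbr
  rw [List.getElem?_map, List.getElem?_drop]
  cases s[m + i]? with
  | none => rfl
  | some r => simp [List.getElem?_drop]

lemma cellN_qtl (s : List (List (List Int))) (m a b : Nat) (ha : 2*a+1 < m) (hb : 2*b+1 < m) :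
    cellN (qtl m s) a b = cellN s a b := by
  unfold cellN
  rw [pN_qtl s m _ _ _ (by omega) (by omega), pN_qtl s m _ _ _ (by omega) (by omega),
      pN_qtl s m _ _ _ (by omega) (by omega), pN_qtl s m _ _ _ (by omega) (by omega),
      pN_qtl s m _ _ _ (by omega) (by omega), pN_qtl s m _ _ _ (by omega) (by omega),
      pN_qtl s m _ _ _ (by omega) (by omega), pN_qtl s m _ _ _ (by omega) (by omega)]

lemma cellN_qtr (s : List (List (List Int))) (m m2 a b : Nat) (hm : m = 2*m2) (ha : 2*a+1 < m) :
    cellN (qtr m s) a b = cellN s a (m2 + b) := by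
  unfold cellN
  rw [pN_qtr s m _ _ _ (by omega), pN_qtr s m _ _ _ (by omega),
      pN_qtr s m _ _ _ (by omega), pN_qtr s m _ _ _ (by omega),
      pN_qtr s m _ _ _ (by omega), pN_qtr s m _ _ _ (by omega),
      pN_qtr s m _ _ _ (by omega), pN_qtr s m _ _ _ (by omega)]
  have e1 : m + (2*b+1) = 2*(m2+b)+1 := by omega
  have e2 : m + 2*b = 2*(m2+b) := by omega
  rw [e1, e2]

lemma cellN_qbl (s : List (List (List Int))) (m m2 a b : Nat) (hm : m = 2*m2) (hb : 2*b+1 < m) :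
    cellN (qbl m s) a b = cellN s (m2 + a) b := by
  unfold cellN
  rw [pN_qbl s m _ _ _ (by omega), pN_qbl s m _ _ _ (by omega),
      pN_qbl s m _ _ _ (by omega), pN_qbl s m _ _ _ (by omega),
      pN_qbl s m _ _ _ (by omega), pN_qbl s m _ _ _ (by omega),
      pN_qbl s m _ _ _ (by omega), pN_qbl s m _ _ _ (by omega)]
  have e1 : m + (2*a+1) = 2*(m2+a)+1 := by omega
  have e2 : m + 2*a = 2*(m2+a) := by omega
  rw [e1, e2]

lemma cellN_qbr (s : List (List (List Int))) (m m2 a b : Nat) (hm : m = 2*m2) :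
    cellN (qbr m s) a b = cellN s (m2 + a) (m2 + b) := by
  unfold cellN
  rw [pN_qbr, pN_qbr, pN_qbr, pN_qbr, pN_qbr, pN_qbr, pN_qbr, pN_qbr]
  have e1 : m + (2*a+1) = 2*(m2+a)+1 := by omega
  have e2 : m + 2*a = 2*(m2+a) := by omega
  have e3 : m + (2*b+1) = 2*(m2+b)+1 := by omega
  have e4 : m + 2*b = 2*(m2+b) := by omega
  rw [e1, e2, e3, e4]

lemma getElem?_red (s : List (List (List Int))) (i : Nat) :
    (red s)[i]? = if i < s.length/2 then some ((List.range (s.length/2)).map (cellN s i)) else none := by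
  unfold red
  by_cases h : i < s.length/2
  · rw [if_pos h, List.getElem?_map, List.getElem?_range h, Option.map_some]
  · rw [if_neg h, List.getElem?_eq_none (by simp; omega)]

lemma length_qtl (s : List (List (List Int))) (m : Nat) (hm : m ≤ s.length) : (qtl m s).length = m := by
  simp [qtl]; omega
lemma length_qtr (s : List (List (List Int))) (m : Nat) (hm : m ≤ s.length) : (qtr m s).length = m := by
  simp [qtr]; omega
lemma length_qbl (s : List (List (List Int))) (m : Nat) : (qbl m s).length = s.length - m := by
  simp [qbl]
lemma length_qbr (s : List (List (List Int))) (m : Nat) : (qbr m s).length = s.length - m := by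
  simp [qbr]

lemma comm_qtl (s : List (List (List Int))) (m m2 : Nat) (hn : s.length = 2*m) (hm : m = 2*m2) :
    qtl m2 (red s) = red (qtl m s) := by
  apply List.ext_getElem?
  intro i
  have hql : (qtl m s).length = m := length_qtl s m (by omega)
  show ((((red s).take m2).map fun r => r.take m2))[i]? = _
  rw [List.getElem?_map, List.getElem?_take, getElem?_red, getElem?_red, hql]
  rw [show m / 2 = m2 by omega, show s.length / 2 = m by omega]
  by_cases h : i < m2
  · rw [if_pos h, if_pos (by omega : i < m), if_pos h]
    simp only [Option.map_some, Option.some.injEq]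
    rw [← List.map_take, List.take_range, show min m2 m = m2 by omega]
    apply List.map_congr_left
    intro b hb
    rw [List.mem_range] at hb
    exact (cellN_qtl s m i b (by omega) (by omega)).symm
  · simp [h]

lemma drop_range_map (m2 m : Nat) :
    List.drop m2 (List.range m) = (List.range (m - m2)).map (fun b => m2 + b) := by
  simp only [List.range_eq_range', List.drop_range', mul_one, zero_add]
  rw [List.range'_eq_map_range, ← List.range_eq_range']

lemma comm_qtr (s : List (List (List Int))) (m m2 : Nat) (hn : s.length = 2*m) (hm : m = 2*m2) :
    qtr m2 (red s) = red (qtr m s) := by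
  apply List.ext_getElem?
  intro i
  have hq : (qtr m s).length = m := length_qtr s m (by omega)
  show ((((red s).take m2).map fun r => r.drop m2))[i]? = _
  rw [List.getElem?_map, List.getElem?_take, getElem?_red, getElem?_red, hq]
  rw [show m / 2 = m2 by omega, show s.length / 2 = m by omega]
  by_cases h : i < m2
  · rw [if_pos h, if_pos (by omega : i < m), if_pos h]
    simp only [Option.map_some, Option.some.injEq]
    rw [← List.map_drop, drop_range_map, show m - m2 = m2 by omega, List.map_map]
    apply List.map_congr_left
    intro b hb
    rw [List.mem_range] at hb
    exact (cellN_qtr s m m2 i b hm (by omega)).symm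
  · simp [h]

lemma comm_qbl (s : List (List (List Int))) (m m2 : Nat) (hn : s.length = 2*m) (hm : m = 2*m2) :
    qbl m2 (red s) = red (qbl m s) := by
  apply List.ext_getElem?
  intro i
  have hq : (qbl m s).length = m := by rw [length_qbl]; omega
  show ((((red s).drop m2).map fun r => r.take m2))[i]? = _
  rw [List.getElem?_map, List.getElem?_drop, getElem?_red, getElem?_red, hq]
  rw [show m / 2 = m2 by omega, show s.length / 2 = m by omega]
  by_cases h : i < m2
  · rw [if_pos (by omega : m2 + i < m), if_pos h]
    simp only [Option.map_some, Option.some.injEq]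
    rw [← List.map_take, List.take_range, show min m2 m = m2 by omega]
    apply List.map_congr_left
    intro b hb
    rw [List.mem_range] at hb
    exact (cellN_qbl s m m2 i b hm (by omega)).symm
  · rw [if_neg (by omega : ¬ m2 + i < m), if_neg h]
    rfl

lemma comm_qbr (s : List (List (List Int))) (m m2 : Nat) (hn : s.length = 2*m) (hm : m = 2*m2) :
    qbr m2 (red s) = red (qbr m s) := by
  apply List.ext_getElem?
  intro i
  have hq : (qbr m s).length = m := by rw [length_qbr]; omega
  show ((((red s).drop m2).map fun r => r.drop m2))[i]? = _
  rw [List.getElem?_map, List.getElem?_drop, getElem?_red, getElem?_red, hq]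
  rw [show m / 2 = m2 by omega, show s.length / 2 = m by omega]
  by_cases h : i < m2
  · rw [if_pos (by omega : m2 + i < m), if_pos h]
    simp only [Option.map_some, Option.some.injEq]
    rw [← List.map_drop, drop_range_map, show m - m2 = m2 by omega, List.map_map]
    apply List.map_congr_left
    intro b hb
    rw [List.mem_range] at hb
    exact (cellN_qbr s m m2 i b hm).symm
  · rw [if_neg (by omega : ¬ m2 + i < m), if_neg h]
    rfl


lemma mk2_congr (a b c d : Int) (h0 : a = c) (h1 : b = d) : mk2 a b = mk2 c d := by rw [h0, h1]

lemma checkB_row (r : List (List Int)) : check_alt [r] = r[0]?.getD [] := by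
  rw [check_alt]
  simp [PySem.List.pyGet?_zero]

-- M: one bottom-up level commutes with B's top-down recursion on power-of-two grids
lemma checkB_red (k : Nat) : ∀ s : List (List (List Int)),
    s.length = 2^(k+1) → check_alt (red s) = check_alt s := by
  induction k with
  | zero =>
    intro s h
    obtain ⟨r0, r1, rfl⟩ := List.length_eq_two.mp h
    have hred : red [r0, r1] = [[cellN [r0, r1] 0 0]] := by
      simp [red, List.range_succ]
    rw [hred, checkB_row, checkB_step _ (by simp), ]
    simp only [List.length_cons, List.length_nil]
    show _ = combB (check_alt (qtl 1 [r0, r1])) (check_alt (qtr 1 [r0, r1]))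
               (check_alt (qbl 1 [r0, r1])) (check_alt (qbr 1 [r0, r1]))
    have htl : qtl 1 [r0, r1] = [r0.take 1] := by simp [qtl]
    have htr : qtr 1 [r0, r1] = [r0.drop 1] := by simp [qtr]
    have hbl : qbl 1 [r0, r1] = [r1.take 1] := by simp [qbl]
    have hbr : qbr 1 [r0, r1] = [r1.drop 1] := by simp [qbr]
    rw [htl, htr, hbl, hbr, checkB_row, checkB_row, checkB_row, checkB_row]
    simp only [List.getElem?_take, List.getElem?_drop, if_pos Nat.zero_lt_one]
    unfold combB cellN pN
    apply mk2_congr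
    · simp [PySem.List.pyGet?_zero]
      ring
    · have p1 : ∀ xs : List Int, PySem.List.pyGet? xs 1 = xs[1]? := by
        intro xs
        rw [PySem.List.pyGet?_of_nonneg xs (by norm_num : (0:Int) ≤ 1)]
        norm_num
      simp [p1]
      ring
  | succ k ih =>
    intro s h
    have hm2 : (1:Nat) ≤ 2^k := Nat.one_le_two_pow
    have hpow1 : (2:Nat)^(k+1) = 2*2^k := by rw [pow_succ]; ring
    have hpow2 : (2:Nat)^(k+2) = 2*2^(k+1) := by rw [pow_succ]; ring
    have hlenred : (red s).length = 2^(k+1) := by simp [red]; omega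
    rw [checkB_step (red s) (by omega), checkB_step s (by omega)]
    rw [hlenred, h]
    rw [show (2:Nat)^(k+1)/2 = 2^k by omega, show (2:Nat)^(k+2)/2 = 2^(k+1) by omega]
    rw [comm_qtl s (2^(k+1)) (2^k) (by omega) (by omega),
        comm_qtr s (2^(k+1)) (2^k) (by omega) (by omega),
        comm_qbl s (2^(k+1)) (2^k) (by omega) (by omega),
        comm_qbr s (2^(k+1)) (2^k) (by omega) (by omega)]
    rw [ih _ (by rw [length_qtl s _ (by omega)]),
        ih _ (by rw [length_qtr s _ (by omega)]),
        ih _ (by rw [length_qbl]; omega),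
        ih _ (by rw [length_qbr]; omega)]

lemma base_eq (s : List (List (List Int))) (h : s.length = 1) : check s = check_alt s := by
  rw [check, check_alt, if_pos h, if_pos h]

lemma main_eq (k : Nat) : ∀ s : List (List (List Int)),
    s.length = 2^k → check s = check_alt s := by
  induction k with
  | zero => intro s h; exact base_eq s h
  | succ k ih =>
    intro s h
    have hm2 : (1:Nat) ≤ 2^k := Nat.one_le_two_pow
    have hpow1 : (2:Nat)^(k+1) = 2*2^k := by rw [pow_succ]; ring
    rw [checkA_step s (by omega)]
    rw [ih (red s) (by simp [red]; omega)]
    exact checkB_red k s h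

-- ===== VERDICT (by name: the statement is the Claim_ definition above) =====
theorem check_spec : Claim_equal_check := by
  intro s _ hpre
  unfold Spec_check
  exact main_eq (Nat.log2 s.length) s hpre.2.1
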